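-- pv_equiv track=rewrite | github.com/Federicomosc/proviamo | prove_midterm.py | algo_x
-- ===== SOURCE A (Python) =====
-- def algo_x(A,x):
--     i = len(A) - 1
--     j = 0
--     while i >= 0:
--         if j == i:
--             j = 0
--             i = i - 1
--         elif A[i] - A[j] > x or A[j] - A[i] > x:
--             return True
--         else:
--             j = j + 1
--     return False
--
-- x = 8
-- ===== SOURCE B (Python) =====
-- def algo_x(A, x):
--     if len(A) < 2:
--         return False
--     s = sorted(A)
--     return s[-1] - s[0] > x
-- ===== Notes on version B (the rewrite author's own statement) =====
-- stated objective: faster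
-- what changed: Replaces the quadratic scan over all index pairs with a single sorted() call followed by one comparison of the two extreme values (max - min > x), guarded by len(A) < 2.
import Mathlib
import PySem

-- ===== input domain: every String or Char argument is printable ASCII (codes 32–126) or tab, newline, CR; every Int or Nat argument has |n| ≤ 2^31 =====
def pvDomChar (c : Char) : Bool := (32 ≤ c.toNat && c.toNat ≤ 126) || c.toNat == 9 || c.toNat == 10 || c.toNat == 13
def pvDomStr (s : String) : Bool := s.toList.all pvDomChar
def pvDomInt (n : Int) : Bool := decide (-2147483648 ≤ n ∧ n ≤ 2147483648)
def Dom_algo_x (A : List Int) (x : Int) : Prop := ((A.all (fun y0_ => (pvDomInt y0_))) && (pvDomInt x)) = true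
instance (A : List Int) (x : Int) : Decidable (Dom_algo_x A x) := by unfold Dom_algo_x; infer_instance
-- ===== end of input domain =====

-- B replaces A's quadratic all-pairs scan by sorting once and comparing the two extremes (faster in a timing run).

-- ===== PORT A =====
-- A's while-loop over the pair of indices (i, j); ported with a fuel counter large
-- enough for every run (proved adequate below).  Indices used by A are always in
-- range (0 ≤ j ≤ i < len A on every access), so pyGetD's default is never taken.
def algo_x_go (A : List Int) (x : Int) : Nat → Int → Int → Bool
  | 0, _, _ => false
  | fuel+1, i, j =>
    if 0 ≤ i then
      if j = i then algo_x_go A x fuel (i-1) 0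
      else if PySem.List.pyGetD A i 0 - PySem.List.pyGetD A j 0 > x ∨
              PySem.List.pyGetD A j 0 - PySem.List.pyGetD A i 0 > x then true
      else algo_x_go A x fuel i (j+1)
    else false

def algo_x (A : List Int) (x : Int) : Bool :=
  algo_x_go A x ((A.length + 1) * (A.length + 1)) ((A.length : Int) - 1) 0

-- ===== PORT B =====
def algo_x_alt (A : List Int) (x : Int) : Bool :=
  if A.length < 2 then false
  else
    let s := PySem.List.sorted A (fun y => y) false
    decide (PySem.List.pyGetD s (-1) 0 - PySem.List.pyGetD s 0 0 > x)

-- ===== PRECONDITION & SPEC =====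
def Spec_algo_x (A : List Int) (x : Int) (out : Bool) : Prop := out = algo_x_alt A x
instance (A : List Int) (x : Int) (out : Bool) : Decidable (Spec_algo_x A x out) := by unfold Spec_algo_x; infer_instance

-- ===== CLAIM (what is proved, stated in full; the proofs are below) =====
def Claim_equal_algo_x : Prop := ∀ (A : List Int) (x : Int), Dom_algo_x A x → Spec_algo_x A x (algo_x A x)

-- ===== LEMMAS AND PROOFS =====

-- "Some pair of distinct positions of A differs by more than x."
def HitPair (A : List Int) (x : Int) : Prop :=
  ∃ i j : Int, 0 ≤ j ∧ j < i ∧ i < (A.length : Int) ∧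
    (PySem.List.pyGetD A i 0 - PySem.List.pyGetD A j 0 > x ∨
     PySem.List.pyGetD A j 0 - PySem.List.pyGetD A i 0 > x)

-- On a negative index the loop exits immediately, whatever the fuel.
theorem algo_x_go_neg (A : List Int) (x : Int) :
    ∀ (fuel : Nat) (i j : Int), i < 0 → algo_x_go A x fuel i j = false := by
  intro fuel i j h
  cases fuel with
  | zero => rfl
  | succ fuel => rw [algo_x_go, if_neg (by omega)]

-- Loop characterisation: with adequate fuel, from state (i, j) with 0 ≤ j ≤ i < len A,
-- the loop returns true iff some not-yet-visited pair (i', j') hits.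
theorem algo_x_go_spec (A : List Int) (x : Int) :
    ∀ (fuel : Nat) (i j : Int), 0 ≤ j → j ≤ i → i < (A.length : Int) →
      (i+1) * (i+2) - 2*j + 2 ≤ 2 * (fuel : Int) →
      (algo_x_go A x fuel i j = true ↔
        ∃ i' j' : Int, 0 ≤ j' ∧ j' < i' ∧ i' ≤ i ∧ (i' = i → j ≤ j') ∧
          (PySem.List.pyGetD A i' 0 - PySem.List.pyGetD A j' 0 > x ∨
           PySem.List.pyGetD A j' 0 - PySem.List.pyGetD A i' 0 > x)) := by
  intro fuel
  induction fuel with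
  | zero =>
    intro i j hj hji hiL hfuel
    exfalso
    simp only [Nat.cast_zero, mul_zero] at hfuel
    nlinarith
  | succ fuel ih =>
    intro i j hj hji hiL hfuel
    rw [algo_x_go, if_pos (le_trans hj hji)]
    by_cases hje : j = i
    · subst hje
      rw [if_pos rfl]
      by_cases hi1 : (0:Int) ≤ j - 1
      · have e : (j+1)*(j+2) = j*(j+1)+2*(j+1) := by ring
        push_cast at hfuel
        rw [ih (j-1) 0 le_rfl hi1 (by omega) (by push_cast; nlinarith)]
        constructor
        · rintro ⟨i', j', h0, h1, h2, _, hhit⟩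
          exact ⟨i', j', h0, h1, by omega, fun h => by omega, hhit⟩
        · rintro ⟨i', j', h0, h1, h2, h3, hhit⟩
          exact ⟨i', j', h0, h1, by omega, fun h => by omega, hhit⟩
      · rw [algo_x_go_neg]
        · constructor
          · intro h; cases h
          · rintro ⟨i', j', h0, h1, h2, h3, _⟩
            exfalso
            rcases eq_or_lt_of_le h2 with h | h
            · exact absurd (h3 h) (by omega)
            · omega
        · omega
    · rw [if_neg hje]
      have hjlt : j < i := lt_of_le_of_ne hji hje
      by_cases hhit : PySem.List.pyGetD A i 0 - PySem.List.pyGetD A j 0 > x ∨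
          PySem.List.pyGetD A j 0 - PySem.List.pyGetD A i 0 > x
      · rw [if_pos hhit]
        constructor
        · intro _
          exact ⟨i, j, hj, hjlt, le_rfl, fun _ => le_rfl, hhit⟩
        · intro _; rfl
      · rw [if_neg hhit]
        push_cast at hfuel
        rw [ih i (j+1) (by omega) (by omega) hiL (by linarith)]
        constructor
        · rintro ⟨i', j', h0, h1, h2, h3, hh⟩
          exact ⟨i', j', h0, h1, h2, fun h => by have := h3 h; omega, hh⟩
        · rintro ⟨i', j', h0, h1, h2, h3, hh⟩
          refine ⟨i', j', h0, h1, h2, fun h => ?_, hh⟩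
          subst h
          have hj' : j ≤ j' := h3 rfl
          rcases eq_or_lt_of_le hj' with h | h
          · exact absurd (h ▸ hh) hhit
          · omega

theorem algo_x_iff (A : List Int) (x : Int) : algo_x A x = true ↔ HitPair A x := by
  unfold algo_x HitPair
  rcases Nat.eq_zero_or_pos A.length with h0 | hpos
  · rw [algo_x_go_neg A x _ _ _ (by simp [h0])]
    constructor
    · intro h; cases h
    · rintro ⟨i, j, h1, h2, h3, _⟩; exfalso; omega
  · have h1 : (1:Int) ≤ (A.length : Int) := by exact_mod_cast hpos
    rw [algo_x_go_spec A x _ ((A.length : Int) - 1) 0 le_rfl (by omega) (by omega)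
        (by push_cast; nlinarith)]
    constructor
    · rintro ⟨i', j', ha, hb, hc, _, hhit⟩
      exact ⟨i', j', ha, hb, by omega, hhit⟩
    · rintro ⟨i', j', ha, hb, hc, hhit⟩
      exact ⟨i', j', ha, hb, by omega, fun _ => ha, hhit⟩

-- Characterisation of B's comparison: with s = sorted(A) and len(A) ≥ 2,
-- s[-1] - s[0] > x holds iff some pair of distinct positions of A differs by more than x.
theorem alt_char (A s : List Int) (x : Int)
    (hs : s = PySem.List.sorted A (fun y => y) false) (hlen : 2 ≤ A.length) :
    (PySem.List.pyGetD s (-1) 0 - PySem.List.pyGetD s 0 0 > x) ↔ HitPair A x := by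
  have hsl : s.length = A.length := by rw [hs]; exact PySem.List.length_sorted ..
  have hmem : ∀ y : Int, y ∈ s ↔ y ∈ A := by
    intro y; rw [hs]; exact PySem.List.mem_sorted ..
  have hmono : ∀ (p q : Nat) (hpq : p ≤ q) (hq : q < s.length),
      s[p]'(lt_of_le_of_lt hpq hq) ≤ s[q]'hq := by
    subst hs
    intro p q hpq hq
    simpa using PySem.List.key_sorted_getElem_mono (xs := A) (key := fun y => y) hpq hq
  have hsl2 : 2 ≤ s.length := by omega
  have hget0 : PySem.List.pyGetD s 0 0 = s[0]'(by omega) := by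
    simpa using PySem.List.pyGetD_eq_getElem (i := (0:Int)) (xs := s) (d := 0)
      (by omega) (by exact_mod_cast by omega)
  have hgetm1 : PySem.List.pyGetD s (-1) 0 = s[s.length - 1]'(by omega) :=
    PySem.List.pyGetD_neg_ofNat s 1 0 (by omega) (by omega)
  -- every element of A lies between the sorted list's first and last entries
  have hbounds : ∀ y ∈ A, s[0]'(by omega) ≤ y ∧ y ≤ s[s.length - 1]'(by omega) := by
    intro y hy
    obtain ⟨p, hp, hyp⟩ := List.mem_iff_getElem.mp ((hmem y).mpr hy)
    exact ⟨hyp ▸ hmono 0 p (by omega) hp, hyp ▸ hmono p (s.length - 1) (by omega) (by omega)⟩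
  rw [hget0, hgetm1]
  unfold HitPair
  constructor
  · -- max - min > x gives a hitting pair of indices
    intro hgt
    obtain ⟨q, hq, hqe⟩ := List.mem_iff_getElem.mp ((hmem _).mp (List.getElem_mem (l := s) (by omega : 0 < s.length)))
    obtain ⟨p, hp, hpe⟩ := List.mem_iff_getElem.mp ((hmem _).mp (List.getElem_mem (l := s) (by omega : s.length - 1 < s.length)))
    have hgp : PySem.List.pyGetD A (p : Int) 0 = A[p] := by
      simpa using PySem.List.pyGetD_eq_getElem (i := ((p : Nat) : Int)) (xs := A) (d := 0)
        (by omega) (by exact_mod_cast hp)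
    have hgq : PySem.List.pyGetD A (q : Int) 0 = A[q] := by
      simpa using PySem.List.pyGetD_eq_getElem (i := ((q : Nat) : Int)) (xs := A) (d := 0)
        (by omega) (by exact_mod_cast hq)
    rcases lt_trichotomy p q with hpq | hpq | hpq
    · exact ⟨(q : Int), (p : Int), by omega, by exact_mod_cast hpq, by exact_mod_cast hq,
        Or.inr (by rw [hgp, hgq, hpe, hqe]; exact hgt)⟩
    · -- extreme values found at one position: all entries are equal and 0 > x
      subst hpq
      have hMm : s[s.length - 1]'(by omega) = s[0]'(by omega) := by rw [← hpe, hqe]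
      have hx0 : (0:Int) > x := by omega
      have hA0 : A[0]'(by omega) = s[0]'(by omega) := by
        obtain ⟨hb1, hb2⟩ := hbounds _ (List.getElem_mem (l := A) (by omega : 0 < A.length))
        omega
      have hA1 : A[1]'(by omega) = s[0]'(by omega) := by
        obtain ⟨hb1, hb2⟩ := hbounds _ (List.getElem_mem (l := A) (by omega : 1 < A.length))
        omega
      refine ⟨1, 0, by omega, by omega, by exact_mod_cast hlen, Or.inl ?_⟩
      have hg1 : PySem.List.pyGetD A 1 0 = A[1]'(by omega) := by
        simpa using PySem.List.pyGetD_eq_getElem (i := (1:Int)) (xs := A) (d := 0)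
          (by omega) (by exact_mod_cast hlen)
      have hg0 : PySem.List.pyGetD A 0 0 = A[0]'(by omega) := by
        simpa using PySem.List.pyGetD_eq_getElem (i := (0:Int)) (xs := A) (d := 0)
          (by omega) (by exact_mod_cast by omega)
      rw [hg1, hg0, hA1, hA0]
      omega
    · exact ⟨(p : Int), (q : Int), by omega, by exact_mod_cast hpq, by exact_mod_cast hp,
        Or.inl (by rw [hgp, hgq, hpe, hqe]; exact hgt)⟩
  · -- a hitting pair forces max - min > x
    rintro ⟨i, j, h1, h2, h3, hhit⟩
    have hgi : PySem.List.pyGetD A i 0 = A[i.toNat]'(by omega) :=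
      PySem.List.pyGetD_eq_getElem A 0 (by omega) (by omega)
    have hgj : PySem.List.pyGetD A j 0 = A[j.toNat]'(by omega) :=
      PySem.List.pyGetD_eq_getElem A 0 (by omega) (by omega)
    obtain ⟨hi1, hi2⟩ := hbounds _ (List.getElem_mem (l := A) (by omega : i.toNat < A.length))
    obtain ⟨hj1, hj2⟩ := hbounds _ (List.getElem_mem (l := A) (by omega : j.toNat < A.length))
    rw [hgi, hgj] at hhit
    rcases hhit with h | h <;> linarith

theorem algo_x_alt_iff (A : List Int) (x : Int) : algo_x_alt A x = true ↔ HitPair A x := by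
  unfold algo_x_alt
  by_cases hlen : A.length < 2
  · rw [if_pos hlen]
    constructor
    · intro h; cases h
    · rintro ⟨i, j, h1, h2, h3, _⟩; exfalso; omega
  · rw [if_neg hlen]
    show decide (PySem.List.pyGetD (PySem.List.sorted A (fun y => y) false) (-1) 0 -
        PySem.List.pyGetD (PySem.List.sorted A (fun y => y) false) 0 0 > x) = true ↔ HitPair A x
    rw [decide_eq_true_iff]
    exact alt_char A _ x rfl (by omega)

-- ===== VERDICT (by name: the statement is the Claim_ definition above) =====
theorem algo_x_spec : Claim_equal_algo_x := by
  intro A x _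
  unfold Spec_algo_x
  exact Bool.eq_iff_iff.mpr ((algo_x_iff A x).trans (algo_x_alt_iff A x).symm)
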